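-- pv_equiv track=rewrite | github.com/mariasintea/AI-labs | lab2-ai-greedy/hill_climbing.py | find_all_arrangements
-- ===== SOURCE A (Python) =====
-- import itertools
--
-- def find_all_arrangements(sol, start, end):
--     all_arrangements = []
--     solution = sol.copy()
--     solution.remove(start)
--     solution.remove(end)
--     for r in range(len(solution) + 1):
--         arrangements_object = itertools.permutations(solution, r)
--         arrangements_list = list(arrangements_object)
--         for elem in arrangements_list:
--             current_arrangement = list(elem)
--             current_arrangement.append(end)
--             current_arrangement.insert(0, start)
--             all_arrangements.append(current_arrangement)
--     return all_arrangements
-- ===== SOURCE B (Python) =====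
-- def find_all_arrangements(sol, start, end):
--     # BFS by level over (prefix, remaining) pairs instead of itertools.permutations per length
--     pool = sol.copy()
--     pool.remove(start)
--     pool.remove(end)
--     out = []
--     level = [([], pool)]
--     for _ in range(len(pool) + 1):
--         out.extend([start] + prefix + [end] for prefix, _ in level)
--         level = [(prefix + [rem[i]], rem[:i] + rem[i + 1:])
--                  for prefix, rem in level for i in range(len(rem))]
--     return out
-- ===== Notes on version B (the rewrite author's own statement) =====
-- stated objective: alternative
-- what changed: Replaces the per-length calls to itertools.permutations with a single level-by-level BFS over (prefix, remaining) pairs, each level emitting its arrangements and expanding to the next; same output in the same order.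
import Mathlib
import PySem

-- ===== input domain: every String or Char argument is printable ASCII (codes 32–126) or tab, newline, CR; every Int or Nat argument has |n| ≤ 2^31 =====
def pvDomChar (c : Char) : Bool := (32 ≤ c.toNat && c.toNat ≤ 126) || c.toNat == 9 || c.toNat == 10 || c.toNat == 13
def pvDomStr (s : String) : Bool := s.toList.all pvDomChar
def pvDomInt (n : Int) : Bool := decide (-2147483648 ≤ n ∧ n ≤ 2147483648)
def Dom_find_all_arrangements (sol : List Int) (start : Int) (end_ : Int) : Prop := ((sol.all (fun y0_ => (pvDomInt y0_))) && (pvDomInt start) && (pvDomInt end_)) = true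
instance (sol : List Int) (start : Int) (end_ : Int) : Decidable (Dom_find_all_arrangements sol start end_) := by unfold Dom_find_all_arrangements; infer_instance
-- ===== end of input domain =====

-- B replaces the per-length itertools.permutations passes by a single level-by-level BFS
-- over (prefix, remaining) pairs; same output in the same order, no speed claim.

-- ===== PORT A =====
-- itertools.permutations(l, r): all length-r arrangements of positions of l, in
-- index-lexicographic order (the documented order); ported as the canonical recursion.
def permsA : List Int → Nat → List (List Int)
  | _, 0 => [[]]
  | l, r + 1 =>
      (List.range l.length).flatMap
        (fun i => (permsA (l.eraseIdx i) r).map (fun p => l[i]! :: p))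

def find_all_arrangements (sol : List Int) (start : Int) (end_ : Int) : List (List Int) :=
  -- solution = sol.copy(); solution.remove(start); solution.remove(end)
  match PySem.List.remove? sol start with
  | none => []          -- ValueError: outside Pre_
  | some s1 =>
    match PySem.List.remove? s1 end_ with
    | none => []        -- ValueError: outside Pre_
    | some solution =>
      -- for r in range(len(solution)+1): for elem in permutations(solution, r): append start::elem++[end]
      (List.range (solution.length + 1)).foldl
        (fun acc r => acc ++ (permsA solution r).map (fun p => start :: (p ++ [end_]))) []

-- ===== PORT B =====
-- one BFS expansion step: next level from the current one (rem[:i] + rem[i+1:] as take/drop,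
-- exact since 0 ≤ i < len(rem))
def stepB (level : List (List Int × List Int)) : List (List Int × List Int) :=
  level.flatMap (fun pq =>
    (List.range pq.2.length).map
      (fun i => (pq.1 ++ [pq.2[i]!], pq.2.take i ++ pq.2.drop (i + 1))))

def bfsB (start end_ : Int) : Nat → List (List Int × List Int) → List (List Int) → List (List Int)
  | 0, _, out => out
  | k + 1, level, out =>
      bfsB start end_ k (stepB level)
        (out ++ level.map (fun pq => start :: (pq.1 ++ [end_])))

def find_all_arrangements_alt (sol : List Int) (start : Int) (end_ : Int) : List (List Int) :=
  match PySem.List.remove? sol start with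
  | none => []          -- ValueError: outside Pre_
  | some s1 =>
    match PySem.List.remove? s1 end_ with
    | none => []        -- ValueError: outside Pre_
    | some pool => bfsB start end_ (pool.length + 1) [([], pool)] []

-- ===== PRECONDITION & SPEC =====
-- Pre_ excludes exactly the inputs where list.remove raises ValueError (start not in sol,
-- or end not in sol after the first start is removed).
def Pre_find_all_arrangements (sol : List Int) (start : Int) (end_ : Int) : Prop :=
  start ∈ sol ∧ end_ ∈ sol.erase start
instance (sol : List Int) (start : Int) (end_ : Int) : Decidable (Pre_find_all_arrangements sol start end_) := by unfold Pre_find_all_arrangements; infer_instance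

def pvWitness_find_all_arrangements : List Int × Int × Int := ([1, 2, 3], 1, 3)

def Spec_find_all_arrangements (sol : List Int) (start : Int) (end_ : Int) (out : List (List Int)) : Prop := out = find_all_arrangements_alt sol start end_
instance (sol : List Int) (start : Int) (end_ : Int) (out : List (List Int)) : Decidable (Spec_find_all_arrangements sol start end_ out) := by unfold Spec_find_all_arrangements; infer_instance

-- ===== CLAIM (what is proved, stated in full; the proofs are below) =====
def Claim_equal_find_all_arrangements : Prop := ∀ (sol : List Int) (start : Int) (end_ : Int), Dom_find_all_arrangements sol start end_ → Pre_find_all_arrangements sol start end_ → Spec_find_all_arrangements sol start end_ (find_all_arrangements sol start end_)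

-- ===== LEMMAS AND PROOFS =====

-- proof-only helpers: iterated step, and a non-tail reformulation of bfsB's output
def stepIter : Nat → List (List Int × List Int) → List (List Int × List Int)
  | 0, level => level
  | k + 1, level => stepIter k (stepB level)

def joinEmit (start end_ : Int) : Nat → List (List Int × List Int) → List (List Int)
  | 0, _ => []
  | k + 1, level =>
      level.map (fun pq => start :: (pq.1 ++ [end_])) ++ joinEmit start end_ k (stepB level)

theorem bfsB_eq_joinEmit (start end_ : Int) (k : Nat) :
    ∀ level out, bfsB start end_ k level out = out ++ joinEmit start end_ k level := by
  induction k with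
  | zero => intro level out; simp [bfsB, joinEmit]
  | succ k ih => intro level out; simp [bfsB, joinEmit, ih, List.append_assoc]

theorem stepB_append (a b : List (List Int × List Int)) :
    stepB (a ++ b) = stepB a ++ stepB b := by
  simp [stepB]

theorem stepIter_append (k : Nat) :
    ∀ a b, stepIter k (a ++ b) = stepIter k a ++ stepIter k b := by
  induction k with
  | zero => intro a b; rfl
  | succ k ih => intro a b; simp [stepIter, stepB_append, ih]

theorem stepIter_split (k : Nat) :
    ∀ L : List (List Int × List Int),
      stepIter k L = L.flatMap (fun pq => stepIter k [pq]) := by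
  intro L
  induction L with
  | nil =>
      induction k with
      | zero => rfl
      | succ k ih => simpa [stepIter, stepB] using ih
  | cons p rest ih =>
      have : stepIter k (p :: rest) = stepIter k [p] ++ stepIter k rest := by
        simpa using stepIter_append k [p] rest
      simp [this, ih]

theorem stepIter_singleton_map_fst (k : Nat) :
    ∀ (pr rem : List Int),
      (stepIter k [(pr, rem)]).map Prod.fst = (permsA rem k).map (pr ++ ·) := by
  induction k with
  | zero => intro pr rem; simp [stepIter, permsA]
  | succ k ih =>
      intro pr rem
      have h1 : stepIter (k + 1) [(pr, rem)]
          = stepIter k ((List.range rem.length).map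
              (fun i => (pr ++ [rem[i]!], rem.take i ++ rem.drop (i + 1)))) := by
        simp [stepIter, stepB]
      rw [h1, stepIter_split]
      simp only [List.flatMap_map, List.map_flatMap]
      simp only [permsA, List.map_flatMap, List.map_map]
      refine List.flatMap_congr (fun i hi => ?_)
      rw [ih]
      rw [List.eraseIdx_eq_take_drop_succ]
      refine List.map_congr_left (fun p hp => ?_)
      simp [Function.comp]

theorem joinEmit_eq_flatMap (start end_ : Int) (k : Nat) :
    ∀ level, joinEmit start end_ k level
      = (List.range k).flatMap
          (fun j => (stepIter j level).map (fun pq => start :: (pq.1 ++ [end_]))) := by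
  induction k with
  | zero => intro level; simp [joinEmit]
  | succ k ih =>
      intro level
      rw [List.range_succ_eq_map]
      simp only [List.flatMap_cons, List.flatMap_map]
      simp [joinEmit, ih, stepIter]

theorem main_loop_eq (start end_ : Int) (l : List Int) :
    (List.range (l.length + 1)).foldl
        (fun acc r => acc ++ (permsA l r).map (fun p => start :: (p ++ [end_]))) []
      = bfsB start end_ (l.length + 1) [([], l)] [] := by
  rw [bfsB_eq_joinEmit, joinEmit_eq_flatMap]
  rw [PySem.List.foldl_append_eq_flatMap]
  simp only [List.nil_append]
  refine List.flatMap_congr (fun j hj => ?_)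
  have h : (stepIter j [([], l)]).map Prod.fst = permsA l j := by
    simpa using stepIter_singleton_map_fst j [] l
  rw [← h, List.map_map]
  rfl

-- ===== VERDICT (by name: the statement is the Claim_ definition above) =====
theorem find_all_arrangements_spec : Claim_equal_find_all_arrangements := by
  intro sol start end_ _ _
  unfold Spec_find_all_arrangements find_all_arrangements find_all_arrangements_alt
  cases h1 : PySem.List.remove? sol start with
  | none => rfl
  | some s1 =>
    cases h2 : PySem.List.remove? s1 end_ with
    | none => simp [h2]
    | some pool => simpa [h2] using main_loop_eq start end_ pool
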